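-- pv_equiv track=rewrite | github.com/privateOmega/coding101 | hackerearth/keypad.py | search_numpad
-- ===== SOURCE A (Python) =====
-- def search_numpad(item):
--     numpad = {
--         1: ['.', ',', '?', '!', '1'],
--         2: ['a', 'b', 'c', '2'],
--         3: ['d', 'e', 'f', '3'],
--         4: ['g', 'h', 'i', '4'],
--         5: ['j', 'k', 'l', '5'],
--         6: ['m', 'n', 'o', '6'],
--         7: ['p', 'q', 'r', 's', '7'],
--         8: ['t', 'u', 'v', '8'],
--         9: ['w', 'x', 'y', 'z', '9'],
--         0: ['_', '0']
--     }
--     for key, keyArray in numpad.items():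
--         for index, value in enumerate(keyArray):
--             if value == item:
--                 return key, index+1
-- ===== SOURCE B (Python) =====
-- def search_numpad(item):
--     # Character-code arithmetic instead of scanning the keypad table:
--     # T9 letter groups computed from ord(c), digits and punctuation by formula.
--     if not isinstance(item, str) or len(item) != 1:
--         return None
--     c = item
--     if 'a' <= c <= 'z':
--         o = ord(c) - ord('a')
--         if o < 15:                      # a..o: keys 2-6, three letters each
--             return 2 + o // 3, o % 3 + 1
--         if o < 19:                      # p,q,r,s
--             return 7, o - 14
--         if o < 22:                      # t,u,v
--             return 8, o - 18
--         return 9, o - 21                # w,x,y,z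
--     if '0' <= c <= '9':
--         d = ord(c) - ord('0')
--         if d == 0:
--             return 0, 2                 # '0' follows '_' on key 0
--         return d, (5 if d in (1, 7, 9) else 4)   # digit sits after its letters
--     if c == '_':
--         return 0, 1
--     i = ".,?!".find(c)                  # punctuation row of key 1
--     if i >= 0:
--         return 1, i + 1
--     return None
-- ===== Notes on version B (the rewrite author's own statement) =====
-- stated objective: alternative
-- what changed: B drops the keypad table entirely and computes (key, position) by closed-form character-code arithmetic: T9 letter groups from ord(c), digits and punctuation by formula, None for anything that is not a single keypad character.
import Mathlib
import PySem

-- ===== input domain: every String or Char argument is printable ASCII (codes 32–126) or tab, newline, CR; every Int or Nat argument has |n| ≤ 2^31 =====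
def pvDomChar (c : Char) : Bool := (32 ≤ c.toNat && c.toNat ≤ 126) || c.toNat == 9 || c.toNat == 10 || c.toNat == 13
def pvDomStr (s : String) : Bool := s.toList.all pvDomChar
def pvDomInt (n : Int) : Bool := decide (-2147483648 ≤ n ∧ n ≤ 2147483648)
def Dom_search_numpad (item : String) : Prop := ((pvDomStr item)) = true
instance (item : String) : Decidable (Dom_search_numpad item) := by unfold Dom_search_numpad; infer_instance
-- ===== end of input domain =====

-- B replaces A's scan of the keypad table by closed-form character-code arithmetic
-- (T9 letter groups from ord(c), digits and punctuation by formula): different algorithm, no table at all.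

-- ===== PORT A =====
-- the literal numpad dict of A
def pvNumpad : List (Int × List String) :=
  [(1, [".", ",", "?", "!", "1"]),
   (2, ["a", "b", "c", "2"]),
   (3, ["d", "e", "f", "3"]),
   (4, ["g", "h", "i", "4"]),
   (5, ["j", "k", "l", "5"]),
   (6, ["m", "n", "o", "6"]),
   (7, ["p", "q", "r", "s", "7"]),
   (8, ["t", "u", "v", "8"]),
   (9, ["w", "x", "y", "z", "9"]),
   (0, ["_", "0"])]

-- inner 'for index, value in enumerate(keyArray): if value == item: return index+1'
def pvRowFind (item : String) : List (Int × String) → Option Int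
  | [] => none
  | (index, value) :: rest =>
      if value == item then some (index + 1) else pvRowFind item rest

-- outer 'for key, keyArray in numpad.items(): …' with early return, falling through to None
def pvOuterFind (item : String) : List (Int × List String) → Option (Int × Int)
  | [] => none
  | (key, keyArray) :: rest =>
      match pvRowFind item (PySem.List.enumerate keyArray) with
      | some j => some (key, j)
      | none => pvOuterFind item rest

def search_numpad (item : String) : Option (Int × Int) :=
  pvOuterFind item pvNumpad

-- ===== PORT B =====
-- Source B: len(item) != 1 → None; otherwise arithmetic on the single character's code.
-- Python's 'a' <= c <= 'z' on one-character strings is code-point comparison (exact).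
def search_numpad_alt (item : String) : Option (Int × Int) :=
  match item.toList with
  | [c] =>
      let n : Int := c.toNat              -- ord(c)
      if 97 ≤ n ∧ n ≤ 122 then            -- 'a' <= c <= 'z'
        let o : Int := n - 97
        if o < 15 then some (2 + PySem.Int.floordiv o 3, PySem.Int.mod o 3 + 1)
        else if o < 19 then some (7, o - 14)
        else if o < 22 then some (8, o - 18)
        else some (9, o - 21)
      else if 48 ≤ n ∧ n ≤ 57 then        -- '0' <= c <= '9'
        let d : Int := n - 48
        if d = 0 then some (0, 2)
        else some (d, if d = 1 ∨ d = 7 ∨ d = 9 then 5 else 4)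
      else if c = '_' then some (0, 1)
      else
        let i : Int := PySem.Str.find ".,?!" (String.ofList [c])
        if 0 ≤ i then some (1, i + 1) else none
  | _ => none

-- ===== PRECONDITION & SPEC =====
def Spec_search_numpad (item : String) (out : Option (Int × Int)) : Prop := out = search_numpad_alt item
instance (item : String) (out : Option (Int × Int)) : Decidable (Spec_search_numpad item out) := by unfold Spec_search_numpad; infer_instance

-- ===== CLAIM (what is proved, stated in full; the proofs are below) =====
def Claim_equal_search_numpad : Prop := ∀ (item : String), Dom_search_numpad item → Spec_search_numpad item (search_numpad item)

-- ===== LEMMAS AND PROOFS =====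

-- every keypad entry is a single character, so a non-single-character item never matches
theorem pvRowFind_none (item : String) (l : List (Int × String))
    (h1 : ∀ p ∈ l, p.2.toList.length = 1) (h2 : item.toList.length ≠ 1) :
    pvRowFind item l = none := by
  induction l with
  | nil => rfl
  | cons p rest ih =>
      have hp := h1 p (List.mem_cons_self)
      have hne : (p.2 == item) = false := by
        apply beq_false_of_ne
        intro he
        exact h2 (by rw [← he]; exact hp)
      obtain ⟨i, v⟩ := p
      simp only [pvRowFind, hne, if_neg Bool.false_ne_true]
      exact ih (fun q hq => h1 q (List.mem_cons_of_mem _ hq))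

theorem pvOuterFind_none (item : String) (l : List (Int × List String))
    (h1 : ∀ p ∈ l, ∀ s ∈ p.2, s.toList.length = 1) (h2 : item.toList.length ≠ 1) :
    pvOuterFind item l = none := by
  induction l with
  | nil => rfl
  | cons p rest ih =>
      obtain ⟨k, arr⟩ := p
      have hr : pvRowFind item (PySem.List.enumerate arr) = none := by
        apply pvRowFind_none item _ _ h2
        intro q hq
        obtain ⟨j, hj, rfl⟩ := (PySem.List.mem_enumerate_iff _ _ _).mp hq
        exact h1 (k, arr) List.mem_cons_self _ (List.getElem_mem hj)
      simp only [pvOuterFind, hr]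
      exact ih (fun q hq s hs => h1 q (List.mem_cons_of_mem _ hq) s hs)

-- the single-character case, checked exhaustively over the ASCII domain
set_option maxRecDepth 20000 in
set_option maxHeartbeats 4000000 in
theorem pv_single : ∀ n < 127,
    search_numpad (String.ofList [Char.ofNat n]) = search_numpad_alt (String.ofList [Char.ofNat n]) := by
  decide

-- ===== VERDICT (by name: the statement is the Claim_ definition above) =====
set_option maxRecDepth 20000 in
theorem search_numpad_spec : Claim_equal_search_numpad := by
  intro item hdom
  unfold Spec_search_numpad
  match hl : item.toList with
  | [c] =>
      have hdom' : item.toList.all pvDomChar = true := hdom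
      have hmem : c ∈ item.toList := by rw [hl]; exact List.mem_singleton.mpr rfl
      have hc : pvDomChar c = true := List.all_eq_true.mp hdom' c hmem
      have hle : c.toNat ≤ 126 := by
        simp only [pvDomChar, Bool.or_eq_true, Bool.and_eq_true, decide_eq_true_eq,
          beq_iff_eq] at hc
        omega
      have hi : item = String.ofList [c] := by
        rw [← hl, String.ofList_toList]
      rw [hi, ← Char.ofNat_toNat c]
      exact pv_single c.toNat (by omega)
  | [] =>
      have hi : item = String.ofList [] := by rw [← hl, String.ofList_toList]
      subst hi
      decide
  | a :: b :: rest =>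
      have hA : search_numpad item = none := by
        apply pvOuterFind_none item pvNumpad _ (by rw [hl]; simp)
        intro p hp s hs
        fin_cases hp <;> simp_all <;> rcases hs with rfl | rfl | rfl | rfl | rfl <;> rfl
      have hB : search_numpad_alt item = none := by
        unfold search_numpad_alt
        rw [hl]
      rw [hA, hB]
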